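-- pv_equiv track=rewrite | github.com/basharzamzami/base44-Analytics | backend/app/services/csv_connector.py | _determine_entity_type
-- ===== SOURCE A (Python) =====
-- from typing import Dict, List, Any, Optional, Tuple
--
-- def _determine_entity_type(normalized_data: Dict, mappings: Dict) -> str:
--     """Determine entity type based on normalized data"""
--
--     # Check for lead indicators
--     if any(field in normalized_data for field in ['email', 'lead_id', 'conversion']):
--         return "lead"
--
--     # Check for campaign indicators
--     if any(field in normalized_data for field in ['campaign_id', 'budget', 'platform']):
--         return "campaign"
--
--     # Check for patient indicators
--     if any(field in normalized_data for field in ['patient_id', 'first_name', 'last_name']):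
--         return "patient"
--
--     # Check for visit indicators
--     if any(field in normalized_data for field in ['visit_id', 'chief_complaint', 'diagnosis']):
--         return "visit"
--
--     # Check for incident indicators
--     if any(field in normalized_data for field in ['incident_id', 'incident_type', 'location']):
--         return "incident"
--
--     # Default entity type
--     return "record"
-- ===== SOURCE B (Python) =====
-- _INDEX = {
--     'email': (0, 'lead'), 'lead_id': (0, 'lead'), 'conversion': (0, 'lead'),
--     'campaign_id': (1, 'campaign'), 'budget': (1, 'campaign'), 'platform': (1, 'campaign'),
--     'patient_id': (2, 'patient'), 'first_name': (2, 'patient'), 'last_name': (2, 'patient'),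
--     'visit_id': (3, 'visit'), 'chief_complaint': (3, 'visit'), 'diagnosis': (3, 'visit'),
--     'incident_id': (4, 'incident'), 'incident_type': (4, 'incident'), 'location': (4, 'incident'),
-- }
--
--
-- def _determine_entity_type(normalized_data, mappings):
--     """Determine entity type based on normalized data"""
--     best = None
--     for key in normalized_data:
--         entry = _INDEX.get(key)
--         if entry is not None and (best is None or entry[0] < best[0]):
--             best = entry
--     return best[1] if best is not None else "record"
-- ===== Notes on version B (the rewrite author's own statement) =====
-- stated objective: idiomatic
-- what changed: Replaces five group-by-group membership scans over the data with a single pass over the data's keys through one precomputed field->(priority,type) index, keeping the lowest-priority match.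
import Mathlib
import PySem

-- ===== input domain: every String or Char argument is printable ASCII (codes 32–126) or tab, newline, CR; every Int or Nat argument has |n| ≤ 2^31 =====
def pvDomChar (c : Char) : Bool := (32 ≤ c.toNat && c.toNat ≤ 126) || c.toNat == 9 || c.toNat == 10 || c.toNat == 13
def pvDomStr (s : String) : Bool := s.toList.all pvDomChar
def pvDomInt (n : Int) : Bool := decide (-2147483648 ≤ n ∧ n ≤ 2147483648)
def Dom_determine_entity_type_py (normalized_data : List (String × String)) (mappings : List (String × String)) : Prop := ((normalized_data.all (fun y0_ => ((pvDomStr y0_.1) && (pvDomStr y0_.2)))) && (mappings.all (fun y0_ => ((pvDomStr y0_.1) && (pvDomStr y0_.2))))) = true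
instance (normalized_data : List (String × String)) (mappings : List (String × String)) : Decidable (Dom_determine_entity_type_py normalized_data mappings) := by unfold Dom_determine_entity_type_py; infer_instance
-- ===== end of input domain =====

-- B replaces five group-by-group membership scans with one pass over the data's keys
-- through a single field -> (priority, type) index, keeping the lowest-priority match (idiomatic).

-- ===== PORT A =====
-- 'field in normalized_data' (dict key membership) = some pair with that key exists
def pvHas (normalized_data : List (String × String)) (field : String) : Bool :=
  normalized_data.any (fun p => p.1 == field)

def determine_entity_type_py (normalized_data : List (String × String)) (mappings : List (String × String)) : String :=
  if (["email", "lead_id", "conversion"].any (fun field => pvHas normalized_data field)) then "lead"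
  else if (["campaign_id", "budget", "platform"].any (fun field => pvHas normalized_data field)) then "campaign"
  else if (["patient_id", "first_name", "last_name"].any (fun field => pvHas normalized_data field)) then "patient"
  else if (["visit_id", "chief_complaint", "diagnosis"].any (fun field => pvHas normalized_data field)) then "visit"
  else if (["incident_id", "incident_type", "location"].any (fun field => pvHas normalized_data field)) then "incident"
  else "record"

-- ===== PORT B =====
-- the module-level _INDEX dict, as an insertion-ordered assoc list
def pvIndex : List (String × (Int × String)) :=
  [("email", (0, "lead")), ("lead_id", (0, "lead")), ("conversion", (0, "lead")),
   ("campaign_id", (1, "campaign")), ("budget", (1, "campaign")), ("platform", (1, "campaign")),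
   ("patient_id", (2, "patient")), ("first_name", (2, "patient")), ("last_name", (2, "patient")),
   ("visit_id", (3, "visit")), ("chief_complaint", (3, "visit")), ("diagnosis", (3, "visit")),
   ("incident_id", (4, "incident")), ("incident_type", (4, "incident")), ("location", (4, "incident"))]

-- _INDEX.get(key)
def pvIndexGet (k : String) : Option (Int × String) :=
  (pvIndex.find? (fun e => k == e.1)).map (·.2)

-- the loop body: entry = _INDEX.get(key); if entry is not None and (best is None or entry[0] < best[0]): best = entry
def pvStep (best : Option (Int × String)) (kv : String × String) : Option (Int × String) :=
  match pvIndexGet kv.1 with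
  | none => best
  | some entry =>
    match best with
    | none => some entry
    | some b => if entry.1 < b.1 then some entry else some b

def determine_entity_type_py_alt (normalized_data : List (String × String)) (mappings : List (String × String)) : String :=
  match normalized_data.foldl pvStep none with
  | some b => b.2
  | none => "record"

-- ===== PRECONDITION & SPEC =====
def Spec_determine_entity_type_py (normalized_data : List (String × String)) (mappings : List (String × String)) (out : String) : Prop := out = determine_entity_type_py_alt normalized_data mappings
instance (normalized_data : List (String × String)) (mappings : List (String × String)) (out : String) : Decidable (Spec_determine_entity_type_py normalized_data mappings out) := by unfold Spec_determine_entity_type_py; infer_instance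

-- ===== CLAIM (what is proved, stated in full; the proofs are below) =====
def Claim_equal_determine_entity_type_py : Prop := ∀ (normalized_data : List (String × String)) (mappings : List (String × String)), Dom_determine_entity_type_py normalized_data mappings → Spec_determine_entity_type_py normalized_data mappings (determine_entity_type_py normalized_data mappings)

-- ===== LEMMAS AND PROOFS =====

-- merge of two partial bests: min by rank, preferring the left (earlier) one on ties
def pvMerge : Option (Int × String) → Option (Int × String) → Option (Int × String)
  | a, none => a
  | none, some e => some e
  | some b, some e => if e.1 < b.1 then some e else some b

theorem pvMerge_assoc (a b c : Option (Int × String)) :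
    pvMerge (pvMerge a b) c = pvMerge a (pvMerge b c) := by
  cases a <;> cases b <;> cases c <;> simp only [pvMerge] <;> split_ifs <;>
    simp only [pvMerge] <;> split_ifs <;> first | rfl | omega

theorem pvStep_eq_merge (a : Option (Int × String)) (kv : String × String) :
    pvStep a kv = pvMerge a (pvStep none kv) := by
  unfold pvStep
  cases pvIndexGet kv.1 <;> cases a <;> simp [pvMerge]

theorem foldl_pvStep_merge (nd : List (String × String)) :
    ∀ a, nd.foldl pvStep a = pvMerge a (nd.foldl pvStep none) := by
  induction nd with
  | nil => intro a; cases a <;> simp [pvMerge]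
  | cons k t ih =>
    intro a
    rw [List.foldl_cons, List.foldl_cons, ih (pvStep a k), ih (pvStep none k),
        pvStep_eq_merge a k, pvMerge_assoc]

-- the five-way priority chain as a function of the five group booleans
def pvGroupIf (G1 G2 G3 G4 G5 : Bool) : Option (Int × String) :=
  if G1 then some ((0:Int), "lead")
  else if G2 then some ((1:Int), "campaign")
  else if G3 then some ((2:Int), "patient")
  else if G4 then some ((3:Int), "visit")
  else if G5 then some ((4:Int), "incident")
  else none

theorem pvStep_none_eq (k : String × String) :
    pvStep none k = pvGroupIf
      (k.1 == "email" || (k.1 == "lead_id" || (k.1 == "conversion" || false)))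
      (k.1 == "campaign_id" || (k.1 == "budget" || (k.1 == "platform" || false)))
      (k.1 == "patient_id" || (k.1 == "first_name" || (k.1 == "last_name" || false)))
      (k.1 == "visit_id" || (k.1 == "chief_complaint" || (k.1 == "diagnosis" || false)))
      (k.1 == "incident_id" || (k.1 == "incident_type" || (k.1 == "location" || false))) := by
  unfold pvGroupIf
  by_cases h1 : k.1 = "email"
  · simp [pvStep, pvIndexGet, pvIndex, h1]
  by_cases h2 : k.1 = "lead_id"
  · simp [pvStep, pvIndexGet, pvIndex, h2]
  by_cases h3 : k.1 = "conversion"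
  · simp [pvStep, pvIndexGet, pvIndex, h3]
  by_cases h4 : k.1 = "campaign_id"
  · simp [pvStep, pvIndexGet, pvIndex, h4]
  by_cases h5 : k.1 = "budget"
  · simp [pvStep, pvIndexGet, pvIndex, h5]
  by_cases h6 : k.1 = "platform"
  · simp [pvStep, pvIndexGet, pvIndex, h6]
  by_cases h7 : k.1 = "patient_id"
  · simp [pvStep, pvIndexGet, pvIndex, h7]
  by_cases h8 : k.1 = "first_name"
  · simp [pvStep, pvIndexGet, pvIndex, h8]
  by_cases h9 : k.1 = "last_name"
  · simp [pvStep, pvIndexGet, pvIndex, h9]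
  by_cases h10 : k.1 = "visit_id"
  · simp [pvStep, pvIndexGet, pvIndex, h10]
  by_cases h11 : k.1 = "chief_complaint"
  · simp [pvStep, pvIndexGet, pvIndex, h11]
  by_cases h12 : k.1 = "diagnosis"
  · simp [pvStep, pvIndexGet, pvIndex, h12]
  by_cases h13 : k.1 = "incident_id"
  · simp [pvStep, pvIndexGet, pvIndex, h13]
  by_cases h14 : k.1 = "incident_type"
  · simp [pvStep, pvIndexGet, pvIndex, h14]
  by_cases h15 : k.1 = "location"
  · simp [pvStep, pvIndexGet, pvIndex, h15]
  · simp [pvStep, pvIndexGet, pvIndex, h1, h2, h3, h4, h5, h6, h7, h8, h9, h10, h11, h12, h13, h14, h15]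

theorem pvRegroup : ∀ (x1 x2 x3 y1 y2 y3 : Bool),
    ((x1 || y1) || ((x2 || y2) || ((x3 || y3) || false))) =
      ((x1 || (x2 || (x3 || false))) || (y1 || (y2 || (y3 || false)))) := by decide

theorem pvMergeGroup : ∀ (G1 G2 G3 G4 G5 B1 B2 B3 B4 B5 : Bool),
    pvMerge (pvGroupIf G1 G2 G3 G4 G5) (pvGroupIf B1 B2 B3 B4 B5) =
      pvGroupIf (G1 || B1) (G2 || B2) (G3 || B3) (G4 || B4) (G5 || B5) := by decide

-- the canonical value of the fold, in terms of A's five group-membership booleans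
def pvCanon (nd : List (String × String)) : Option (Int × String) :=
  if (["email", "lead_id", "conversion"].any (fun field => pvHas nd field)) then some (0, "lead")
  else if (["campaign_id", "budget", "platform"].any (fun field => pvHas nd field)) then some (1, "campaign")
  else if (["patient_id", "first_name", "last_name"].any (fun field => pvHas nd field)) then some (2, "patient")
  else if (["visit_id", "chief_complaint", "diagnosis"].any (fun field => pvHas nd field)) then some (3, "visit")
  else if (["incident_id", "incident_type", "location"].any (fun field => pvHas nd field)) then some (4, "incident")
  else none

theorem foldl_pvStep_canon (nd : List (String × String)) :
    nd.foldl pvStep none = pvCanon nd := by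
  induction nd with
  | nil => simp [pvCanon, pvHas]
  | cons k t ih =>
    rw [List.foldl_cons, foldl_pvStep_merge, ih, pvStep_none_eq]
    simp only [pvCanon, pvHas, List.any_cons, List.any_nil]
    simp only [pvRegroup]
    exact pvMergeGroup _ _ _ _ _ _ _ _ _ _

-- ===== VERDICT (by name: the statement is the Claim_ definition above) =====
theorem determine_entity_type_py_spec : Claim_equal_determine_entity_type_py := by
  intro nd ms _
  unfold Spec_determine_entity_type_py determine_entity_type_py determine_entity_type_py_alt
  rw [foldl_pvStep_canon]
  unfold pvCanon
  split_ifs <;> rfl
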